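-- pv_equiv track=rewrite | github.com/bisscay/advent-of-code-2021 | Day4/GiantSquid.py | get_row_sum
-- ===== SOURCE A (Python) =====
-- def get_row_sum(row, current_j, draw_set):
--     sum = 0 # No need computing
--     for j in range(len(row)):
--         if row[j] in draw_set:
--             sum += int(row[j])
--         else:
--             return (0, current_j + max(1, j-current_j))
--     return (sum, len(row)-1)
-- ===== SOURCE B (Python) =====
-- def get_row_sum(row, current_j, draw_set):
--     first_bad = next((j for j in range(len(row)) if row[j] not in draw_set), None)
--     if first_bad is None:
--         return (sum(int(x) for x in row), len(row) - 1)
--     return (0, current_j + max(1, first_bad - current_j))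
-- ===== Notes on version B (the rewrite author's own statement) =====
-- stated objective: alternative
-- what changed: Replaces A's fused accumulate-and-validate loop with a search for the first element not in draw_set followed by a separate full summation pass only when none is found.
import Mathlib
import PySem

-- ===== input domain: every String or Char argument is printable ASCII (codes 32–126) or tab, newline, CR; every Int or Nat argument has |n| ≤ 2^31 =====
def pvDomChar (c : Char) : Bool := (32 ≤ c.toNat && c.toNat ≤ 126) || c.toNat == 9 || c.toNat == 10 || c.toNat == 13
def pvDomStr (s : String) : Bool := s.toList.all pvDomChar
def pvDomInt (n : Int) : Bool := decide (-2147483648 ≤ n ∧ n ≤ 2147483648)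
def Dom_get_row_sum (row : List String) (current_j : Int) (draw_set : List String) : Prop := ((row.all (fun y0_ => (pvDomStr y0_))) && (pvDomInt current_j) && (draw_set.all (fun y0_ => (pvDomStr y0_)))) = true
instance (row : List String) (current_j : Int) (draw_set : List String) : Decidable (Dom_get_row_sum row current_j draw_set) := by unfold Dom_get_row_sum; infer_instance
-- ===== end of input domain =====

-- B searches for the first index not in draw_set, then (only if none) sums the ints,
-- replacing A's fused accumulate-and-validate loop (objective: alternative decomposition).

-- ===== PORT A =====
-- A's loop over j in range(len(row)), carrying the running sum.
-- int(row[j]) is ported as (PySem.Int.ofStr? _).getD 0; the none case (ValueError) is excluded by Pre_.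
def get_row_sum.go (row : List String) (current_j : Int) (draw_set : List String)
    (sum : Int) (j : Nat) : Int × Int :=
  if h : j < row.length then
    if draw_set.contains row[j] then
      get_row_sum.go row current_j draw_set (sum + (PySem.Int.ofStr? row[j]).getD 0) (j + 1)
    else
      (0, current_j + max 1 ((j : Int) - current_j))
  else
    (sum, (row.length : Int) - 1)
termination_by row.length - j

def get_row_sum (row : List String) (current_j : Int) (draw_set : List String) : Int × Int :=
  get_row_sum.go row current_j draw_set 0 0

-- ===== PORT B =====
-- next((j for j in range(len(row)) if row[j] not in draw_set), None): scan for first non-member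
def firstBadIdx (draw_set : List String) : List String → Nat → Option Nat
  | [], _ => none
  | x :: xs, j => if draw_set.contains x then firstBadIdx draw_set xs (j + 1) else some j

-- sum(int(x) for x in row); int ported as (PySem.Int.ofStr? _).getD 0 (ValueError excluded by Pre_)
def sumInts : List String → Int
  | [] => 0
  | x :: xs => (PySem.Int.ofStr? x).getD 0 + sumInts xs

def get_row_sum_alt (row : List String) (current_j : Int) (draw_set : List String) : Int × Int :=
  match firstBadIdx draw_set row 0 with
  | none => (sumInts row, (row.length : Int) - 1)
  | some j => (0, current_j + max 1 ((j : Int) - current_j))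

-- ===== PRECONDITION & SPEC =====
-- Pre_ excludes exactly the inputs where Python's A raises ValueError: some element whose
-- whole prefix (itself included) lies in draw_set fails to parse as an int.
def Pre_get_row_sum (row : List String) (current_j : Int) (draw_set : List String) : Prop :=
  ∀ j, j < row.length →
    ((row.take (j + 1)).all (fun x => draw_set.contains x)) = true →
    (PySem.Int.ofStr? (row.getD j "")).isSome = true
instance (row : List String) (current_j : Int) (draw_set : List String) : Decidable (Pre_get_row_sum row current_j draw_set) := by unfold Pre_get_row_sum; infer_instance

def pvWitness_get_row_sum : List String × Int × List String := (["1", "2"], 0, ["1", "2", "3"])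

def Spec_get_row_sum (row : List String) (current_j : Int) (draw_set : List String) (out : Int × Int) : Prop := out = get_row_sum_alt row current_j draw_set
instance (row : List String) (current_j : Int) (draw_set : List String) (out : Int × Int) : Decidable (Spec_get_row_sum row current_j draw_set out) := by unfold Spec_get_row_sum; infer_instance

-- ===== CLAIM (what is proved, stated in full; the proofs are below) =====
def Claim_equal_get_row_sum : Prop := ∀ (row : List String) (current_j : Int) (draw_set : List String), Dom_get_row_sum row current_j draw_set → Pre_get_row_sum row current_j draw_set → Spec_get_row_sum row current_j draw_set (get_row_sum row current_j draw_set)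


-- ===== LEMMAS AND PROOFS =====

-- The invariant linking A's fused loop from index j to B's two passes over the suffix row.drop j.
theorem go_eq (row : List String) (cj : Int) (ds : List String) :
    ∀ j s, get_row_sum.go row cj ds s j =
      match firstBadIdx ds (row.drop j) j with
      | none => (s + sumInts (row.drop j), (row.length : Int) - 1)
      | some k => (0, cj + max 1 ((k : Int) - cj)) := by
  intro j
  induction hn : row.length - j using Nat.strong_induction_on generalizing j with
  | _ n ih =>
    intro s
    rw [get_row_sum.go]
    by_cases h : j < row.length
    · rw [List.drop_eq_getElem_cons h]
      simp only [h, dif_pos, firstBadIdx, sumInts]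
      by_cases hc : ds.contains row[j]
      · rw [if_pos hc, if_pos hc, ih (row.length - (j + 1)) (by omega) (j + 1) rfl]
        cases hfb : firstBadIdx ds (row.drop (j + 1)) (j + 1) with
        | none => simp; ring
        | some k => simp
      · rw [if_neg hc, if_neg hc]
    · have hd : row.drop j = [] := List.drop_eq_nil_of_le (by omega)
      simp [h, hd, firstBadIdx, sumInts]

-- ===== VERDICT (by name: the statement is the Claim_ definition above) =====
theorem get_row_sum_spec : Claim_equal_get_row_sum := by
  intro row cj ds _ _
  unfold Spec_get_row_sum get_row_sum get_row_sum_alt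
  rw [go_eq]
  simp only [List.drop_zero]
  cases hfb : firstBadIdx ds row 0 <;> simp
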